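-- pv_equiv track=rewrite | github.com/piakoller/netTubo | clinical_trials/study_filter.py | analyze_listed_publications
-- ===== SOURCE A (Python) =====
-- from typing import Dict, List, Optional, Tuple
--
-- def analyze_listed_publications(study: Dict) -> Tuple[bool, int, List[str]]:
--     """
--     Analyze publications listed in the study data.
--
--     Returns:
--         Tuple of (has_results_publications, publications_count, publication_sources)
--     """
--     publications = study.get('publications', [])
--     publications_count = len(publications)
--
--     if publications_count == 0:
--         return False, 0, []
--
--     # Keywords that indicate actual results (not just protocols or rationale)
--     results_keywords = [
--         'results', 'outcome', 'efficacy', 'safety', 'response', 'survival',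
--         'toxicity', 'adverse', 'endpoint', 'analysis', 'findings', 'data',
--         'trial results', 'study results', 'interim analysis', 'final analysis',
--         'primary endpoint', 'secondary endpoint', 'progression', 'remission'
--     ]
--
--     # Keywords that suggest protocol/design papers (not results)
--     protocol_keywords = [
--         'protocol', 'design', 'rationale', 'methodology', 'methods',
--         'study design', 'trial design', 'background', 'introduction'
--     ]
--
--     has_results_publications = False
--     publication_sources = []
--
--     for pub in publications:
--         citation = pub.get('citation', '').lower()
--         pub_type = pub.get('type', '').lower()
--         pmid = pub.get('pmid', '')
--
--         publication_sources.append(f"PMID: {pmid}" if pmid else "Citation listed")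
--
--         # Skip if it's clearly a protocol paper
--         if any(keyword in citation for keyword in protocol_keywords):
--             continue
--
--         # Check for results indicators
--         if any(keyword in citation for keyword in results_keywords):
--             has_results_publications = True
--             break
--
--         # If type indicates results
--         if 'result' in pub_type:
--             has_results_publications = True
--             break
--
--     return has_results_publications, publications_count, publication_sources
-- ===== SOURCE B (Python) =====
-- def analyze_listed_publications(study):
--     """Two-phase version: first locate the index of the first results-bearing
--     publication, then build the source list over the scanned prefix."""
--     publications = study.get('publications', [])
--     n = len(publications)
--     if n == 0:
--         return False, 0, []
--
--     results_keywords = [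
--         'results', 'outcome', 'efficacy', 'safety', 'response', 'survival',
--         'toxicity', 'adverse', 'endpoint', 'analysis', 'findings', 'data',
--         'trial results', 'study results', 'interim analysis', 'final analysis',
--         'primary endpoint', 'secondary endpoint', 'progression', 'remission'
--     ]
--     protocol_keywords = [
--         'protocol', 'design', 'rationale', 'methodology', 'methods',
--         'study design', 'trial design', 'background', 'introduction'
--     ]
--
--     trigger_idx = None
--     for i, pub in enumerate(publications):
--         citation = pub.get('citation', '').lower()
--         if any(k in citation for k in protocol_keywords):
--             continue
--         if any(k in citation for k in results_keywords) or 'result' in pub.get('type', '').lower():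
--             trigger_idx = i
--             break
--
--     scanned = publications if trigger_idx is None else publications[:trigger_idx + 1]
--     sources = [("PMID: " + p.get('pmid', '')) if p.get('pmid', '') else "Citation listed"
--                for p in scanned]
--     return trigger_idx is not None, n, sources
-- ===== Notes on version B (the rewrite author's own statement) =====
-- stated objective: alternative
-- what changed: A interleaves source-building and result-detection in one stateful loop with break; B first finds the index of the first results-bearing publication, then maps the source formatter over the corresponding prefix slice.
import Mathlib
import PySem

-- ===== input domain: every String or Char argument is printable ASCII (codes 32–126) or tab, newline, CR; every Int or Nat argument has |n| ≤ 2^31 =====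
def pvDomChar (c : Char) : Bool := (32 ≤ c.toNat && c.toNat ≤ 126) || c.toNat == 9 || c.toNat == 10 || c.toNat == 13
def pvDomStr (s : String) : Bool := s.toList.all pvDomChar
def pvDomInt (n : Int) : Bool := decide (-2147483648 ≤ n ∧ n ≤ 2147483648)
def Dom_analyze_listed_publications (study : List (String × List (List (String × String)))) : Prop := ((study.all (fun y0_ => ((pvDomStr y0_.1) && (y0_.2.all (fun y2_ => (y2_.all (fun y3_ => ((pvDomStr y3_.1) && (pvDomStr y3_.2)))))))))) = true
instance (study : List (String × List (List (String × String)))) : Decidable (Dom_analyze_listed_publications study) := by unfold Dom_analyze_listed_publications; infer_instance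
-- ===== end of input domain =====

-- B restructures A's single stateful scan-with-break into: find the index of the
-- first results-bearing publication, then map the source formatter over the prefix.
-- Objective: alternative decomposition (same asymptotic cost).

-- shared literal keyword lists (both Pythons carry the same literals)
def resultsKeywords : List String :=
  ["results", "outcome", "efficacy", "safety", "response", "survival",
   "toxicity", "adverse", "endpoint", "analysis", "findings", "data",
   "trial results", "study results", "interim analysis", "final analysis",
   "primary endpoint", "secondary endpoint", "progression", "remission"]

def protocolKeywords : List String :=
  ["protocol", "design", "rationale", "methodology", "methods",
   "study design", "trial design", "background", "introduction"]

-- pub.get(k, '') on a dict-as-assoc-list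
def pubGet (pub : List (String × String)) (k : String) : String :=
  (PySem.Dict.mk pub).getD k ""

-- f"PMID: {pmid}" if pmid else "Citation listed"
def srcOf (pub : List (String × String)) : String :=
  let pmid := pubGet pub "pmid"
  if pmid = "" then "Citation listed" else "PMID: " ++ pmid

-- ===== PORT A =====
-- A's for-loop with continue/break, carried state (has_results, sources)
def loopA : List (List (String × String)) → Bool → List String → Bool × List String
  | [], h, srcs => (h, srcs)
  | pub :: rest, h, srcs =>
    let citation := PySem.Str.lower (pubGet pub "citation")
    let pub_type := PySem.Str.lower (pubGet pub "type")
    let srcs' := srcs ++ [srcOf pub]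
    if protocolKeywords.any (fun k => PySem.Str.isIn k citation) then loopA rest h srcs'
    else if resultsKeywords.any (fun k => PySem.Str.isIn k citation) then (true, srcs')
    else if PySem.Str.isIn "result" pub_type then (true, srcs')
    else loopA rest h srcs'

def analyze_listed_publications (study : List (String × List (List (String × String)))) : Bool × Int × List String :=
  let publications := (PySem.Dict.mk study).getD "publications" []
  let publications_count : Int := publications.length
  if publications_count == 0 then (false, 0, [])
  else
    let r := loopA publications false []
    (r.1, publications_count, r.2)

-- ===== PORT B =====
-- phase 1: index of the first publication that triggers a result (None if no break)
def findTrig : List (List (String × String)) → Nat → Option Nat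
  | [], _ => none
  | pub :: rest, i =>
    let citation := PySem.Str.lower (pubGet pub "citation")
    if protocolKeywords.any (fun k => PySem.Str.isIn k citation) then findTrig rest (i + 1)
    else if resultsKeywords.any (fun k => PySem.Str.isIn k citation)
            || PySem.Str.isIn "result" (PySem.Str.lower (pubGet pub "type")) then some i
    else findTrig rest (i + 1)

def analyze_listed_publications_alt (study : List (String × List (List (String × String)))) : Bool × Int × List String :=
  let publications := (PySem.Dict.mk study).getD "publications" []
  let n : Int := publications.length
  if n == 0 then (false, 0, [])
  else
    match findTrig publications 0 with
    | none => (false, n, publications.map srcOf)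
    | some i => (true, n, (PySem.List.slice publications none (some ((i : Int) + 1))).map srcOf)

-- ===== PRECONDITION & SPEC =====
def Spec_analyze_listed_publications (study : List (String × List (List (String × String)))) (out : Bool × Int × List String) : Prop := out = analyze_listed_publications_alt study
instance (study : List (String × List (List (String × String)))) (out : Bool × Int × List String) : Decidable (Spec_analyze_listed_publications study out) := by unfold Spec_analyze_listed_publications; infer_instance

-- ===== CLAIM (what is proved, stated in full; the proofs are below) =====
def Claim_equal_analyze_listed_publications : Prop := ∀ (study : List (String × List (List (String × String)))), Dom_analyze_listed_publications study → Spec_analyze_listed_publications study (analyze_listed_publications study)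

-- ===== LEMMAS AND PROOFS =====

theorem findTrig_shift (pubs : List (List (String × String))) (i : Nat) :
    findTrig pubs i = (findTrig pubs 0).map (· + i) := by
  induction pubs generalizing i with
  | nil => simp [findTrig]
  | cons p rest ih =>
    simp only [findTrig]
    split_ifs with h1 h2
    · rw [ih (i + 1), ih 1]
      cases findTrig rest 0
      · simp
      · simp; omega
    · simp
    · rw [ih (i + 1), ih 1]
      cases findTrig rest 0
      · simp
      · simp; omega

theorem loopA_eq (pubs : List (List (String × String))) (srcs : List String) :
    loopA pubs false srcs =
      match findTrig pubs 0 with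
      | none => (false, srcs ++ pubs.map srcOf)
      | some i => (true, srcs ++ (pubs.take (i + 1)).map srcOf) := by
  induction pubs generalizing srcs with
  | nil => simp [loopA, findTrig]
  | cons p rest ih =>
    by_cases h1 : (protocolKeywords.any fun k => PySem.Str.isIn k (PySem.Str.lower (pubGet p "citation"))) = true
    · simp only [loopA, findTrig, h1, if_true]
      rw [ih, findTrig_shift rest 1]
      cases findTrig rest 0 <;> simp [List.take_succ_cons]
    · by_cases h2 : (resultsKeywords.any fun k => PySem.Str.isIn k (PySem.Str.lower (pubGet p "citation"))) = true
      · have hor : ((resultsKeywords.any fun k => PySem.Str.isIn k (PySem.Str.lower (pubGet p "citation")))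
            || PySem.Str.isIn "result" (PySem.Str.lower (pubGet p "type"))) = true := by simp only [h2, Bool.true_or]
        simp only [loopA, findTrig, if_neg h1, if_pos h2, if_pos hor]
        simp [List.take_succ_cons]
      · by_cases h3 : PySem.Str.isIn "result" (PySem.Str.lower (pubGet p "type")) = true
        · have hor : ((resultsKeywords.any fun k => PySem.Str.isIn k (PySem.Str.lower (pubGet p "citation")))
              || PySem.Str.isIn "result" (PySem.Str.lower (pubGet p "type"))) = true := by simp only [h3, Bool.or_true]
          simp only [loopA, findTrig, if_neg h1, if_neg h2, if_pos h3, if_pos hor]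
          simp [List.take_succ_cons]
        · simp only [loopA, findTrig, h1, h2, h3, Bool.or_self]
          rw [ih, findTrig_shift rest 1]
          cases findTrig rest 0 <;> simp [List.take_succ_cons]

theorem slice_take (pubs : List (List (String × String))) (i : Nat) :
    PySem.List.slice pubs none (some ((i : Int) + 1)) = pubs.take (i + 1) := by
  have : ((i : Int) + 1) = ((i + 1 : Nat) : Int) := by push_cast; ring
  rw [this, PySem.List.slice_to]
  · simp
  · positivity

-- ===== VERDICT (by name: the statement is the Claim_ definition above) =====
theorem analyze_listed_publications_spec : Claim_equal_analyze_listed_publications := by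
  intro study _
  unfold Spec_analyze_listed_publications analyze_listed_publications analyze_listed_publications_alt
  simp only
  set pubs := (PySem.Dict.mk study).getD "publications" [] with hp
  by_cases h : ((pubs.length : Int) == 0) = true
  · simp [h]
  · simp only [h, Bool.false_eq_true, if_false]
    rw [loopA_eq pubs []]
    cases hf : findTrig pubs 0 with
    | none => simp
    | some i => simp [slice_take]
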